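-- pv_equiv track=rewrite | github.com/kaynaat007/mydspractice | otherds/backtracking/palindrome_partitioing_131.py | construct_palindrome_matrix
-- ===== SOURCE A (Python) =====
-- def construct_palindrome_matrix(s):
--
--     n = len(s)
--     is_palin = [[0 for _ in range(n)] for _ in range(n)]
--     for i in range(n):
--         for j in range(n):
--             if i == j:
--                 is_palin[i][j] = 1
--
--     for k in range(1, n):
--         l = n - k
--         j = k
--         for i in range(l):
--             if s[i] == s[j] and j - i + 1 == 2:
--                 is_palin[i][j] = 1
--             elif s[i] == s[j] and is_palin[i+1][j-1] == 1:
--                 is_palin[i][j] = 1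
--             else:
--                 is_palin[i][j] = 0
--             j += 1
--
--     return is_palin
-- ===== SOURCE B (Python) =====
-- def construct_palindrome_matrix(s):
--     n = len(s)
--     return [[1 if i <= j and s[i:j + 1] == s[i:j + 1][::-1] else 0
--              for j in range(n)]
--             for i in range(n)]
-- ===== Notes on version B (the rewrite author's own statement) =====
-- stated objective: simpler
-- what changed: Replaces A's diagonal-by-diagonal DP recurrence over a mutated n x n table with a direct comprehension that tests each cell by comparing the slice s[i:j+1] with its reverse.
import Mathlib
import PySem

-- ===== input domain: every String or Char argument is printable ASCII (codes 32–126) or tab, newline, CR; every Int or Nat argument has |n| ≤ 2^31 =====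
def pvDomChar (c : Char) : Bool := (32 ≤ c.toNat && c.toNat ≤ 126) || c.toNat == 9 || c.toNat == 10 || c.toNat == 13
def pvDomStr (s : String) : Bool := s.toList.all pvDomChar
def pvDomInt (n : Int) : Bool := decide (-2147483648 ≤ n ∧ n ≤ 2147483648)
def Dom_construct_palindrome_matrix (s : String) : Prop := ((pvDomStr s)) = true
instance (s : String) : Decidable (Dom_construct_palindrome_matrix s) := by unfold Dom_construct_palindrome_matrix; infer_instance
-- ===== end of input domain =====

-- B replaces A's diagonal DP recurrence by a direct per-cell palindrome test on the slice
-- (simpler; a different algorithm, not claimed faster); both programs are total, so no Pre_.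

-- ===== PORT A =====
-- is_palin[i][j] (read; every index A reads is in range, so getD is exact)
def pvGetE (m : List (List Int)) (i j : Nat) : Int := (m.getD i []).getD j 0
-- is_palin[i][j] = v (write)
def pvSetE (m : List (List Int)) (i j : Nat) (v : Int) : List (List Int) :=
  m.set i ((m.getD i []).set j v)

def construct_palindrome_matrix (s : String) : List (List Int) :=
  let cs := s.toList
  let n := cs.length
  -- is_palin = [[0 for _ in range(n)] for _ in range(n)]
  let m0 := (List.range n).map (fun _ => (List.range n).map (fun _ => (0 : Int)))
  -- for i in range(n): for j in range(n): if i == j: is_palin[i][j] = 1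
  let m1 := (List.range n).foldl (fun m i =>
      (List.range n).foldl (fun m j => if i = j then pvSetE m i j 1 else m) m) m0
  -- for k in range(1, n): …  (range(1, n) = List.range' 1 (n - 1))
  let m2 := (List.range' 1 (n - 1)).foldl (fun m k =>
      -- l = n - k; j = k; for i in range(l): …; j += 1   (state = (is_palin, j); s[i], s[j] in range, getD exact)
      ((List.range (n - k)).foldl (fun (st : List (List Int) × Nat) i =>
          let m' :=
            if cs.getD i ' ' = cs.getD st.2 ' ' ∧ st.2 - i + 1 = 2 then pvSetE st.1 i st.2 1
            else if cs.getD i ' ' = cs.getD st.2 ' ' ∧ pvGetE st.1 (i + 1) (st.2 - 1) = 1 then pvSetE st.1 i st.2 1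
            else pvSetE st.1 i st.2 0
          (m', st.2 + 1)) (m, k)).1) m1
  m2

-- ===== PORT B =====
-- [[1 if i <= j and s[i:j+1] == s[i:j+1][::-1] else 0 for j in range(n)] for i in range(n)]
-- (t[::-1] ported as t.reverse — PySem.List.slice?_none_none_neg_one)
def construct_palindrome_matrix_alt (s : String) : List (List Int) :=
  let cs := s.toList
  let n := cs.length
  (List.range n).map (fun (i : Nat) => (List.range n).map (fun (j : Nat) =>
    let t := PySem.List.slice cs (some (i : Int)) (some ((j : Int) + 1))
    if i ≤ j ∧ t = t.reverse then (1 : Int) else 0))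

-- ===== PRECONDITION & SPEC =====
def Spec_construct_palindrome_matrix (s : String) (out : List (List Int)) : Prop := out = construct_palindrome_matrix_alt s
instance (s : String) (out : List (List Int)) : Decidable (Spec_construct_palindrome_matrix s out) := by unfold Spec_construct_palindrome_matrix; infer_instance

-- ===== CLAIM (what is proved, stated in full; the proofs are below) =====
def Claim_equal_construct_palindrome_matrix : Prop := ∀ (s : String), Dom_construct_palindrome_matrix s → Spec_construct_palindrome_matrix s (construct_palindrome_matrix s)

-- ===== LEMMAS AND PROOFS =====

-- the n×n matrix whose (a,b) entry is f a b
def pvMat (n : Nat) (f : Nat → Nat → Int) : List (List Int) :=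
  (List.range n).map (fun a => (List.range n).map (f a))

-- "s[a:b+1] == s[a:b+1][::-1]"; trivially true when b < a (empty slice)
abbrev pvPal (cs : List Char) (a b : Nat) : Prop :=
  (cs.drop a).take (b + 1 - a) = ((cs.drop a).take (b + 1 - a)).reverse

-- entry function of A's matrix after diagonals 1..K have been processed
def pvF (cs : List Char) (K a b : Nat) : Int :=
  if a ≤ b ∧ b - a ≤ K ∧ pvPal cs a b then 1 else 0

lemma pvMat_congr {n : Nat} {f g : Nat → Nat → Int}
    (h : ∀ a b, a < n → b < n → f a b = g a b) : pvMat n f = pvMat n g := by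
  unfold pvMat
  refine List.map_congr_left (fun a ha => ?_)
  refine List.map_congr_left (fun b hb => ?_)
  exact h a b (List.mem_range.mp ha) (List.mem_range.mp hb)

lemma set_map_range {α : Type} (n i : Nat) (g : Nat → α) (x : α) :
    ((List.range n).map g).set i x = (List.range n).map (fun a => if a = i then x else g a) := by
  apply List.ext_getElem
  · simp
  · intro a h1 h2
    simp only [List.getElem_set, List.getElem_map, List.getElem_range]
    by_cases h : i = a
    · simp [h]
    · rw [if_neg h, if_neg (fun hh : a = i => h hh.symm)]

lemma pvGetE_mat {n : Nat} (f : Nat → Nat → Int) {i j : Nat} (hi : i < n) (hj : j < n) :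
    pvGetE (pvMat n f) i j = f i j := by
  unfold pvGetE pvMat
  rw [PySem.List.getD_map_range _ n i [] hi, PySem.List.getD_map_range _ n j 0 hj]

lemma pvSetE_mat {n : Nat} (f : Nat → Nat → Int) {i j : Nat} (v : Int) (hi : i < n) :
    pvSetE (pvMat n f) i j v
      = pvMat n (fun a b => if a = i ∧ b = j then v else f a b) := by
  unfold pvSetE pvMat
  rw [PySem.List.getD_map_range _ n i [] hi, set_map_range, set_map_range]
  refine List.map_congr_left (fun a _ => ?_)
  by_cases h : a = i
  · subst h
    rw [if_pos rfl]
    exact List.map_congr_left (fun b _ => by by_cases hb : b = j <;> simp [hb])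
  · rw [if_neg h]
    exact List.map_congr_left (fun b _ => by simp [h])

lemma pal_diag (cs : List Char) (a : Nat) (h : a < cs.length) : pvPal cs a a := by
  unfold pvPal
  have h1 : a + 1 - a = 1 := by omega
  rw [h1, List.drop_eq_getElem_cons h, List.take_succ_cons, List.take_zero]
  rfl

lemma pal_lt (cs : List Char) (a b : Nat) (h : b < a) : pvPal cs a b := by
  unfold pvPal
  have : b + 1 - a = 0 := by omega
  simp [this]

lemma pal_step (cs : List Char) (i j : Nat) (hij : i < j) (hj : j < cs.length) :
    pvPal cs i j ↔ cs[i] = cs[j] ∧ pvPal cs (i + 1) (j - 1) := by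
  have h1 : j + 1 - i = (j - i - 1) + 1 + 1 := by omega
  have h2 : (cs.drop (i + 1))[j - i - 1]? = some cs[j] := by
    rw [List.getElem?_drop]
    have : i + 1 + (j - i - 1) = j := by omega
    rw [this, List.getElem?_eq_getElem hj]
  have h3 : j - 1 + 1 - (i + 1) = j - i - 1 := by omega
  have hdecomp : (cs.drop i).take (j + 1 - i)
      = cs[i] :: ((cs.drop (i + 1)).take (j - 1 + 1 - (i + 1)) ++ [cs[j]]) := by
    rw [List.drop_eq_getElem_cons (show i < cs.length by omega), h1, List.take_succ_cons,
      List.take_add_one, h2, h3]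
    rfl
  unfold pvPal
  rw [hdecomp]
  simp only [List.reverse_cons, List.reverse_append, List.reverse_cons, List.reverse_nil,
    List.nil_append, List.cons_append, List.cons.injEq]
  constructor
  · rintro ⟨h1', h2'⟩
    rw [h1'] at h2'
    exact ⟨h1', (List.append_left_inj _).mp h2'⟩
  · rintro ⟨h1', h2'⟩
    exact ⟨h1', by rw [← h2', h1']⟩

-- Stage 1: the diagonal-initialisation pass
lemma stage1_inner (n i : Nat) (hi : i < n) (f : Nat → Nat → Int) :
    ∀ m : Nat, (List.range m).foldl (fun m j => if i = j then pvSetE m i j 1 else m) (pvMat n f)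
      = if i < m then pvMat n (fun a b => if a = i ∧ b = i then 1 else f a b)
        else pvMat n f := by
  intro m
  induction m with
  | zero => simp
  | succ m ih =>
    rw [List.range_succ, List.foldl_append, List.foldl_cons, List.foldl_nil, ih]
    by_cases h : i < m
    · have hne : ¬ (i = m) := by omega
      simp [h, hne, Nat.lt_succ_of_lt h]
    · by_cases he : i = m
      · subst he
        rw [if_neg h, if_pos rfl, if_pos (Nat.lt_succ_self i)]
        exact pvSetE_mat f 1 hi
      · have h2 : ¬ i < m + 1 := by omega
        simp [h, he, h2]

lemma stage1 (n : Nat) :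
    ∀ m : Nat, m ≤ n →
      (List.range m).foldl (fun mm i =>
          (List.range n).foldl (fun mm j => if i = j then pvSetE mm i j 1 else mm) mm)
        (pvMat n (fun _ _ => 0))
      = pvMat n (fun a b => if a = b ∧ a < m then 1 else 0) := by
  intro m
  induction m with
  | zero => intro _; exact pvMat_congr (fun a b _ _ => by simp)
  | succ m ih =>
    intro hm
    rw [List.range_succ, List.foldl_append, List.foldl_cons, List.foldl_nil,
      ih (by omega), stage1_inner n m (by omega), if_pos (by omega)]
    exact pvMat_congr (fun a b _ _ => by
      by_cases h1 : a = m ∧ b = m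
      · rw [if_pos h1, if_pos ⟨by omega, by omega⟩]
      · rw [if_neg h1]
        by_cases h2 : a = b ∧ a < m
        · rw [if_pos h2, if_pos ⟨h2.1, by omega⟩]
        · rw [if_neg h2, if_neg (by
            rintro ⟨hab, hlt⟩
            rcases Nat.lt_succ_iff_lt_or_eq.mp hlt with h' | h'
            · exact h2 ⟨hab, h'⟩
            · exact h1 ⟨h', by omega⟩)])

-- writing the freshly computed diagonal entry (t, k+t) extends the "first t entries done" shape
lemma update_congr (cs : List Char) (n k t : Nat) (v : Int)
    (hv : v = if pvPal cs t (k + t) then 1 else 0) :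
    pvMat n (fun a b => if a = t ∧ b = k + t then v
        else (if b = a + k ∧ a < t then (if pvPal cs a b then 1 else 0) else pvF cs (k - 1) a b))
      = pvMat n (fun a b => if b = a + k ∧ a < t + 1 then (if pvPal cs a b then 1 else 0)
          else pvF cs (k - 1) a b) := by
  refine pvMat_congr (fun a b _ _ => ?_)
  by_cases h1 : a = t ∧ b = k + t
  · obtain ⟨h1a, h1b⟩ := h1
    subst h1a; subst h1b
    rw [if_pos ⟨rfl, rfl⟩, if_pos (show k + a = a + k ∧ a < a + 1 from ⟨by omega, by omega⟩)]
    exact hv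
  · rw [if_neg h1]
    by_cases h2 : b = a + k ∧ a < t
    · rw [if_pos h2, if_pos (show b = a + k ∧ a < t + 1 from ⟨h2.1, by omega⟩)]
    · rw [if_neg h2, if_neg (show ¬ (b = a + k ∧ a < t + 1) from by
        rintro ⟨hb, ha⟩
        rcases Nat.lt_succ_iff_lt_or_eq.mp ha with h' | h'
        · exact h2 ⟨hb, h'⟩
        · exact h1 ⟨h', by omega⟩)]

-- Stage 2: one diagonal (fixed k), folding i = 0 .. t-1 with running j = k + i
lemma stage2_inner (cs : List Char) (n k : Nat) (hn : n = cs.length)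
    (hk1 : 1 ≤ k) (hkn : k ≤ n - 1) :
    ∀ t : Nat, t ≤ n - k →
      (List.range t).foldl (fun (st : List (List Int) × Nat) i =>
          (if cs.getD i ' ' = cs.getD st.2 ' ' ∧ st.2 - i + 1 = 2 then pvSetE st.1 i st.2 1
            else if cs.getD i ' ' = cs.getD st.2 ' ' ∧ pvGetE st.1 (i + 1) (st.2 - 1) = 1 then pvSetE st.1 i st.2 1
            else pvSetE st.1 i st.2 0, st.2 + 1)) (pvMat n (pvF cs (k - 1)), k)
      = (pvMat n (fun a b => if b = a + k ∧ a < t then (if pvPal cs a b then 1 else 0)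
            else pvF cs (k - 1) a b), k + t) := by
  intro t
  induction t with
  | zero =>
    intro _
    simp only [List.range_zero, List.foldl_nil, Nat.add_zero]
    refine Prod.ext ?_ rfl
    exact (pvMat_congr (fun a b _ _ => by simp)).symm
  | succ t ih =>
    intro ht
    rw [List.range_succ, List.foldl_append, List.foldl_cons, List.foldl_nil, ih (by omega)]
    have htn : t < n := by omega
    have hjn : k + t < n := by omega
    have hgt : cs.getD t ' ' = cs[t]'(by omega) := List.getD_eq_getElem cs ' ' (by omega)
    have hgj : cs.getD (k + t) ' ' = cs[k + t]'(by omega) := List.getD_eq_getElem cs ' ' (by omega)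
    -- the value is_palin[i+1][j-1] read in this step
    have hread : pvGetE (pvMat n (fun a b => if b = a + k ∧ a < t then (if pvPal cs a b then 1 else 0)
            else pvF cs (k - 1) a b)) (t + 1) (k + t - 1)
        = (if k = 1 then 0 else if pvPal cs (t + 1) (k + t - 1) then 1 else 0) := by
      rw [pvGetE_mat _ (by omega) (by omega), if_neg (by omega)]
      by_cases hk : k = 1
      · subst hk
        rw [if_pos rfl]
        unfold pvF
        rw [if_neg (by omega)]
      · rw [if_neg hk]
        unfold pvF
        by_cases hp : pvPal cs (t + 1) (k + t - 1)
        · rw [if_pos ⟨by omega, by omega, hp⟩, if_pos hp]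
        · rw [if_neg (fun hc => hp hc.2.2), if_neg hp]
    have hpal : pvPal cs t (k + t) ↔ cs[t]'(by omega) = cs[k + t]'(by omega) ∧ pvPal cs (t + 1) (k + t - 1) := by
      have := pal_step cs t (k + t) (by omega) (by omega)
      simpa using this
    simp only
    rw [hread]
    refine Prod.ext ?_ (by show k + t + 1 = k + (t + 1); omega)
    simp only
    by_cases hb1 : cs.getD t ' ' = cs.getD (k + t) ' ' ∧ (k + t) - t + 1 = 2
    · rw [if_pos hb1]
      have hpp : pvPal cs t (k + t) := by
        refine hpal.mpr ⟨by rw [← hgt, ← hgj]; exact hb1.1, ?_⟩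
        have hk : k = 1 := by omega
        exact pal_lt cs (t + 1) (k + t - 1) (by omega)
      rw [pvSetE_mat _ 1 htn]
      exact update_congr cs n k t 1 (by rw [if_pos hpp])
    · rw [if_neg hb1]
      by_cases hb2 : cs.getD t ' ' = cs.getD (k + t) ' ' ∧ (if k = 1 then (0 : Int) else if pvPal cs (t + 1) (k + t - 1) then 1 else 0) = 1
      · rw [if_pos hb2]
        have hk : ¬ k = 1 := by
          intro hk
          rw [if_pos hk] at hb2
          exact absurd hb2.2 (by norm_num)
        have hmid : pvPal cs (t + 1) (k + t - 1) := by
          by_contra hp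
          rw [if_neg hk, if_neg hp] at hb2
          exact absurd hb2.2 (by norm_num)
        have hpp : pvPal cs t (k + t) :=
          hpal.mpr ⟨by rw [← hgt, ← hgj]; exact hb2.1, hmid⟩
        rw [pvSetE_mat _ 1 htn]
        exact update_congr cs n k t 1 (by rw [if_pos hpp])
      · rw [if_neg hb2]
        have hpp : ¬ pvPal cs t (k + t) := by
          intro hp
          obtain ⟨hc, hmid⟩ := hpal.mp hp
          have hc' : cs.getD t ' ' = cs.getD (k + t) ' ' := by rw [hgt, hgj]; exact hc
          by_cases hk : k = 1
          · exact hb1 ⟨hc', by omega⟩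
          · exact hb2 ⟨hc', by rw [if_neg hk, if_pos hmid]⟩
        rw [pvSetE_mat _ 0 htn]
        exact update_congr cs n k t 0 (by rw [if_neg hpp])

-- Stage 3: the whole k-loop
lemma stage3 (cs : List Char) (n : Nat) (hn : n = cs.length) :
    ∀ K : Nat, K ≤ n - 1 →
      (List.range' 1 K).foldl (fun m k =>
        ((List.range (n - k)).foldl (fun (st : List (List Int) × Nat) i =>
            (if cs.getD i ' ' = cs.getD st.2 ' ' ∧ st.2 - i + 1 = 2 then pvSetE st.1 i st.2 1
              else if cs.getD i ' ' = cs.getD st.2 ' ' ∧ pvGetE st.1 (i + 1) (st.2 - 1) = 1 then pvSetE st.1 i st.2 1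
              else pvSetE st.1 i st.2 0, st.2 + 1)) (m, k)).1) (pvMat n (pvF cs 0))
      = pvMat n (pvF cs K) := by
  intro K
  induction K with
  | zero => intro _; simp
  | succ K ih =>
    intro hK
    rw [List.range'_concat, List.foldl_append, List.foldl_cons, List.foldl_nil, ih (by omega)]
    simp only [one_mul]
    have hk1 : 1 ≤ 1 + K := by omega
    have hkk : (1 + K) - 1 = K := by omega
    have := stage2_inner cs n (1 + K) hn hk1 (by omega) (n - (1 + K)) le_rfl
    rw [hkk] at this
    rw [this]
    simp only
    refine pvMat_congr (fun a b ha hb => ?_)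
    by_cases h1 : b = a + (1 + K) ∧ a < n - (1 + K)
    · rw [if_pos h1]
      unfold pvF
      by_cases hp : pvPal cs a b
      · rw [if_pos hp, if_pos ⟨by omega, by omega, hp⟩]
      · rw [if_neg hp, if_neg (fun hc => hp hc.2.2)]
    · rw [if_neg h1]
      unfold pvF
      by_cases hc : a ≤ b ∧ b - a ≤ K ∧ pvPal cs a b
      · rw [if_pos hc, if_pos ⟨hc.1, by omega, hc.2.2⟩]
      · rw [if_neg hc, if_neg (by
          rintro ⟨hab, hle, hp⟩
          by_cases hK' : b - a ≤ K
          · exact hc ⟨hab, hK', hp⟩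
          · exact h1 ⟨by omega, by omega⟩)]

-- ===== VERDICT (by name: the statement is the Claim_ definition above) =====
theorem construct_palindrome_matrix_spec : Claim_equal_construct_palindrome_matrix := by
  intro s _
  unfold Spec_construct_palindrome_matrix construct_palindrome_matrix construct_palindrome_matrix_alt
  simp only
  set cs := s.toList with hcs
  set n := cs.length with hn
  have hm0 : (List.range n).map (fun _ => (List.range n).map (fun _ => (0 : Int)))
      = pvMat n (fun _ _ => 0) := rfl
  rw [hm0, stage1 n n le_rfl]
  have hm1 : pvMat n (fun a b => if a = b ∧ a < n then 1 else 0) = pvMat n (pvF cs 0) :=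
    pvMat_congr (fun a b ha hb => by
      unfold pvF
      by_cases h : a = b
      · subst h
        rw [if_pos ⟨rfl, ha⟩, if_pos ⟨le_rfl, by omega, pal_diag cs a (by omega)⟩]
      · rw [if_neg (fun hc => h hc.1), if_neg (by rintro ⟨h1, h2, _⟩; omega)]
    )
  rw [hm1, stage3 cs n rfl (n - 1) le_rfl]
  refine pvMat_congr (fun a b ha hb => ?_)
  have hcast : ((b : Int) + 1) = (((b + 1 : Nat)) : Int) := by push_cast; ring
  rw [hcast, PySem.List.slice_natCast]
  unfold pvF
  by_cases h : a ≤ b ∧ pvPal cs a b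
  · rw [if_pos ⟨h.1, by omega, h.2⟩, if_pos ⟨h.1, h.2⟩]
  · rw [if_neg (fun hc => h ⟨hc.1, hc.2.2⟩), if_neg (fun hc => h ⟨hc.1, hc.2⟩)]
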